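-- pv_equiv track=rewrite | github.com/AthulSabu2002/Python | palindromicSubstring.py | palindromic_substrings_score
-- ===== SOURCE A (Python) =====
-- def expand_around_center(s, left, right):
--     while left >= 0 and right < len(s) and s[left] == s[right]:
--         left -= 1
--         right += 1
--     return s[left + 1:right]
--
-- def palindromic_substrings_score(s):
--     score = 0
--     palindromes = set()
--
--     for i in range(len(s)):
--
--         even_palindrome = expand_around_center(s, i, i + 1)
--         if even_palindrome:
--             palindromes.add(even_palindrome)
--
--         odd_palindrome = expand_around_center(s, i, i)
--         if odd_palindrome:
--             palindromes.add(odd_palindrome)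
--
--     for palindrome in palindromes:
--         l = len(palindrome)
--         if l == 5:
--             score += 10
--         elif l == 4:
--             score += 5
--
--     return score
-- ===== SOURCE B (Python) =====
-- def palindromic_substrings_score(s):
--     # One linear scan per target length: a length-4/5 palindrome is counted by A
--     # iff it is the *maximal* expansion at its center, i.e. it cannot be extended
--     # by one character on both sides.  So just test each window directly.
--     n = len(s)
--     found4 = set()
--     for i in range(n - 3):
--         if s[i] == s[i + 3] and s[i + 1] == s[i + 2] and \
--            (i == 0 or i + 4 == n or s[i - 1] != s[i + 4]):
--             found4.add(s[i:i + 4])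
--     found5 = set()
--     for i in range(n - 4):
--         if s[i] == s[i + 4] and s[i + 1] == s[i + 3] and \
--            (i == 0 or i + 5 == n or s[i - 1] != s[i + 5]):
--             found5.add(s[i:i + 5])
--     return 5 * len(found4) + 10 * len(found5)
-- ===== Notes on version B (the rewrite author's own statement) =====
-- stated objective: faster
-- what changed: Instead of expanding around every center (worst-case quadratic, e.g. on 'aaaa...'), B tests each length-4 and length-5 window directly for being a palindrome that is not extendable by one character on both sides (exactly the maximal per-center palindromes A collects) in one linear scan per length.
import Mathlib
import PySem

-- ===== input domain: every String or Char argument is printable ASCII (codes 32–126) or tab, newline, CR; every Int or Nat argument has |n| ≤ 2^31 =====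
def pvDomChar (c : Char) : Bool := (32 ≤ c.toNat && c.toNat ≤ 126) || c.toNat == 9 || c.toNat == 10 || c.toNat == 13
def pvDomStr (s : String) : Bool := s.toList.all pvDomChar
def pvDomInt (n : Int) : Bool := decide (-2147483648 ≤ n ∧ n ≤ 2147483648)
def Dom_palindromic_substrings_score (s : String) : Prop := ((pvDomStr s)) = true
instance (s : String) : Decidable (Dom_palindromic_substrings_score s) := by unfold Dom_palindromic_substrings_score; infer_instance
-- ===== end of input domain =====

-- B replaces A's expand-around-every-center scan by one direct linear test of each
-- length-4 and length-5 window for being a non-extendable palindrome.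

-- ===== PORT A =====
-- while left >= 0 and right < len(s) and s[left] == s[right]: left -= 1; right += 1
-- return s[left+1:right]
def pvExpand (cs : List Char) (left right : Int) : List Char :=
  if h : 0 ≤ left ∧ right < (cs.length : Int) ∧
      PySem.List.pyGet? cs left = PySem.List.pyGet? cs right then
    pvExpand cs (left - 1) (right + 1)
  else
    PySem.List.slice cs (some (left + 1)) (some right)
termination_by (left + 1).toNat
decreasing_by omega

def palindromic_substrings_score (s : String) : Int :=
  let cs := s.toList
  let palindromes : PySem.Set (List Char) :=
    (PySem.List.pyRange 0 (cs.length : Int) 1).foldl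
      (fun (p : PySem.Set (List Char)) i =>
        let evenPal := pvExpand cs i (i + 1)
        let p := if evenPal ≠ [] then PySem.Set.add p evenPal else p
        let oddPal := pvExpand cs i i
        if oddPal ≠ [] then PySem.Set.add p oddPal else p)
      []
  palindromes.foldl
    (fun score pal =>
      if (pal.length : Int) = 5 then score + 10
      else if (pal.length : Int) = 4 then score + 5
      else score)
    0

-- ===== PORT B =====
-- window i of length 4 is a non-extendable palindrome
def pvWin4 (cs : List Char) (i : Int) : Bool :=
  (PySem.List.pyGet? cs i == PySem.List.pyGet? cs (i + 3)) &&
  (PySem.List.pyGet? cs (i + 1) == PySem.List.pyGet? cs (i + 2)) &&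
  (i == 0 || i + 4 == (cs.length : Int) || !(PySem.List.pyGet? cs (i - 1) == PySem.List.pyGet? cs (i + 4)))

-- window i of length 5 is a non-extendable palindrome
def pvWin5 (cs : List Char) (i : Int) : Bool :=
  (PySem.List.pyGet? cs i == PySem.List.pyGet? cs (i + 4)) &&
  (PySem.List.pyGet? cs (i + 1) == PySem.List.pyGet? cs (i + 3)) &&
  (i == 0 || i + 5 == (cs.length : Int) || !(PySem.List.pyGet? cs (i - 1) == PySem.List.pyGet? cs (i + 5)))

def palindromic_substrings_score_alt (s : String) : Int :=
  let cs := s.toList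
  let n : Int := (cs.length : Int)
  let found4 : PySem.Set (List Char) :=
    (PySem.List.pyRange 0 (n - 3) 1).foldl
      (fun (f : PySem.Set (List Char)) i =>
        if pvWin4 cs i then PySem.Set.add f (PySem.List.slice cs (some i) (some (i + 4))) else f)
      []
  let found5 : PySem.Set (List Char) :=
    (PySem.List.pyRange 0 (n - 4) 1).foldl
      (fun (f : PySem.Set (List Char)) i =>
        if pvWin5 cs i then PySem.Set.add f (PySem.List.slice cs (some i) (some (i + 5))) else f)
      []
  5 * (found4.length : Int) + 10 * (found5.length : Int)

-- ===== PRECONDITION & SPEC =====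
def Spec_palindromic_substrings_score (s : String) (out : Int) : Prop := out = palindromic_substrings_score_alt s
instance (s : String) (out : Int) : Decidable (Spec_palindromic_substrings_score s out) := by unfold Spec_palindromic_substrings_score; infer_instance

-- ===== CLAIM (what is proved, stated in full; the proofs are below) =====
def Claim_equal_palindromic_substrings_score : Prop := ∀ (s : String), Dom_palindromic_substrings_score s → Spec_palindromic_substrings_score s (palindromic_substrings_score s)

-- ===== LEMMAS AND PROOFS =====

def pvOk (cs : List Char) (l r : Int) : Prop :=
  0 ≤ l ∧ r < (cs.length : Int) ∧ PySem.List.pyGet? cs l = PySem.List.pyGet? cs r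
theorem pvWin4_iff (cs : List Char) (i : Int) :
    pvWin4 cs i = true ↔
      (PySem.List.pyGet? cs i = PySem.List.pyGet? cs (i + 3) ∧
       PySem.List.pyGet? cs (i + 1) = PySem.List.pyGet? cs (i + 2) ∧
       (i = 0 ∨ i + 4 = (cs.length : Int) ∨
         PySem.List.pyGet? cs (i - 1) ≠ PySem.List.pyGet? cs (i + 4))) := by
  simp [pvWin4]
  tauto

theorem pvWin5_iff (cs : List Char) (i : Int) :
    pvWin5 cs i = true ↔
      (PySem.List.pyGet? cs i = PySem.List.pyGet? cs (i + 4) ∧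
       PySem.List.pyGet? cs (i + 1) = PySem.List.pyGet? cs (i + 3) ∧
       (i = 0 ∨ i + 5 = (cs.length : Int) ∨
         PySem.List.pyGet? cs (i - 1) ≠ PySem.List.pyGet? cs (i + 5))) := by
  simp [pvWin5]
  tauto

theorem pvExpand_eq (cs : List Char) (l r : Int) :
    ∃ k : ℕ, pvExpand cs l r = PySem.List.slice cs (some (l + 1 - k)) (some (r + k)) ∧
      (∀ j : ℕ, j < k → pvOk cs (l - j) (r + j)) ∧ ¬ pvOk cs (l - k) (r + k) := by
  induction l, r using pvExpand.induct cs with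
  | case1 l r h ih =>
    obtain ⟨k, hk, hall, hstop⟩ := ih
    refine ⟨k + 1, ?_, ?_, ?_⟩
    · rw [pvExpand, dif_pos h, hk]
      congr 2 <;> push_cast <;> ring
    · intro j hj
      match j with
      | 0 => simpa [pvOk] using h
      | (j' + 1) =>
        have := hall j' (by omega)
        have e1 : l - ((j' + 1 : ℕ) : ℤ) = l - 1 - (j' : ℤ) := by push_cast; ring
        have e2 : r + ((j' + 1 : ℕ) : ℤ) = r + 1 + (j' : ℤ) := by push_cast; ring
        rw [e1, e2]; exact this
    · have e1 : l - ((k + 1 : ℕ) : ℤ) = l - 1 - (k : ℤ) := by push_cast; ring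
      have e2 : r + ((k + 1 : ℕ) : ℤ) = r + 1 + (k : ℤ) := by push_cast; ring
      rw [e1, e2]; exact hstop
  | case2 l r h =>
    refine ⟨0, ?_, by omega, by simpa [pvOk] using h⟩
    rw [pvExpand, dif_neg h]
    norm_num
theorem pvSliceLen (cs : List Char) (a b : Int) (h0 : 0 ≤ a) (h1 : a ≤ b) (h2 : b ≤ (cs.length : Int)) :
    ((PySem.List.slice cs (some a) (some b)).length : Int) = b - a := by
  rw [PySem.List.slice_toNat cs h0 (by omega)]
  simp
  omega

theorem pvSliceNil (cs : List Char) (a b : Int) (h0 : 0 ≤ b) (h1 : b ≤ a) :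
    (PySem.List.slice cs (some a) (some b)).length = 0 := by
  rw [PySem.List.slice_toNat cs (by omega) h0]
  simp
  omega

-- exit bounds: if k > 0 the (k-1)-th step was legal
theorem pvBounds (cs : List Char) (l r : Int) (k : ℕ) (hk : 0 < k)
    (hall : ∀ j : ℕ, j < k → pvOk cs (l - j) (r + j)) :
    0 ≤ l + 1 - k ∧ r + k ≤ (cs.length : Int) := by
  have h := hall (k - 1) (by omega)
  obtain ⟨h1, h2, -⟩ := h
  have e : ((k - 1 : ℕ) : ℤ) = (k : ℤ) - 1 := by omega
  rw [e] at h1 h2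
  omega

theorem pvEven_len4 (cs : List Char) (i : Int) (h0 : 0 ≤ i)
    (hlen : (pvExpand cs i (i + 1)).length = 4) :
    pvWin4 cs (i - 1) = true ∧ 0 ≤ i - 1 ∧ i - 1 < (cs.length : Int) - 3 ∧
      pvExpand cs i (i + 1) = PySem.List.slice cs (some (i - 1)) (some (i + 3)) := by
  obtain ⟨k, heq, hall, hstop⟩ := pvExpand_eq cs i (i + 1)
  rcases Nat.eq_zero_or_pos k with hk | hk
  · subst hk
    rw [heq] at hlen
    rw [pvSliceNil cs _ _ (by omega) (by push_cast; omega)] at hlen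
    omega
  obtain ⟨ha, hb⟩ := pvBounds cs i (i + 1) k hk hall
  have hlen' : ((2 : ℤ)) * k = 4 := by
    rw [heq] at hlen
    have := pvSliceLen cs (i + 1 - k) (i + 1 + k) ha (by omega) hb
    omega
  have hk2 : (k : ℤ) = 2 := by omega
  have h0' := hall 0 (by omega)
  have h1' := hall 1 (by omega)
  simp only [pvOk, Nat.cast_zero, Nat.cast_one] at h0' h1'
  obtain ⟨-, hb1, he1⟩ := h0'
  obtain ⟨ha2, hb2, he2⟩ := h1'
  rw [hk2] at heq hstop
  have ea : i + 1 - 2 = i - 1 := by ring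
  have eb : i + 1 + 2 = i + 3 := by ring
  rw [ea, eb] at heq
  refine ⟨(pvWin4_iff _ _).mpr ⟨?_, ?_, ?_⟩, by omega, by omega, heq⟩
  · have e3 : i - 1 + 3 = i + 2 := by ring
    have e4 : i + 1 + 1 = i + 2 := by ring
    rw [e4] at he2
    rw [e3]
    exact he2
  · have e1 : i - 1 + 1 = i := by ring
    have e2 : i - 1 + 2 = i + 1 := by ring
    have e0 : i - 0 = i := by ring
    have e0' : i + 1 + 0 = i + 1 := by ring
    rw [e0, e0'] at he1
    rw [e1, e2]
    exact he1
  · by_cases c1 : i - 1 = 0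
    · exact Or.inl c1
    by_cases c2 : i - 1 + 4 = (cs.length : Int)
    · exact Or.inr (Or.inl c2)
    refine Or.inr (Or.inr ?_)
    intro he
    apply hstop
    refine ⟨by omega, by omega, ?_⟩
    have e1 : i - 1 - 1 = i - 2 := by ring
    have e2 : i - 1 + 4 = i + 3 := by ring
    have e3 : i + 1 + 2 = i + 3 := by ring
    rw [e1, e2] at he
    rw [e3]
    exact he

theorem pvOdd_not_len4 (cs : List Char) (i : Int) (h0 : 0 ≤ i) :
    (pvExpand cs i i).length ≠ 4 := by
  obtain ⟨k, heq, hall, -⟩ := pvExpand_eq cs i i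
  rcases Nat.eq_zero_or_pos k with hk | hk
  · subst hk
    rw [heq, pvSliceNil cs _ _ (by omega) (by push_cast; omega)]
    omega
  obtain ⟨ha, hb⟩ := pvBounds cs i i k hk hall
  intro hlen
  rw [heq] at hlen
  have := pvSliceLen cs (i + 1 - k) (i + k) ha (by omega) hb
  omega

theorem pvEven_not_len5 (cs : List Char) (i : Int) (h0 : 0 ≤ i) :
    (pvExpand cs i (i + 1)).length ≠ 5 := by
  obtain ⟨k, heq, hall, -⟩ := pvExpand_eq cs i (i + 1)
  rcases Nat.eq_zero_or_pos k with hk | hk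
  · subst hk
    rw [heq, pvSliceNil cs _ _ (by omega) (by push_cast; omega)]
    omega
  obtain ⟨ha, hb⟩ := pvBounds cs i (i + 1) k hk hall
  intro hlen
  rw [heq] at hlen
  have := pvSliceLen cs (i + 1 - k) (i + 1 + k) ha (by omega) hb
  omega

theorem pvOdd_len5 (cs : List Char) (i : Int) (h0 : 0 ≤ i)
    (hlen : (pvExpand cs i i).length = 5) :
    pvWin5 cs (i - 2) = true ∧ 0 ≤ i - 2 ∧ i - 2 < (cs.length : Int) - 4 ∧
      pvExpand cs i i = PySem.List.slice cs (some (i - 2)) (some (i + 3)) := by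
  obtain ⟨k, heq, hall, hstop⟩ := pvExpand_eq cs i i
  rcases Nat.eq_zero_or_pos k with hk | hk
  · subst hk
    rw [heq, pvSliceNil cs _ _ (by omega) (by push_cast; omega)] at hlen
    omega
  obtain ⟨ha, hb⟩ := pvBounds cs i i k hk hall
  have hlen' : ((2 : ℤ)) * k - 1 = 5 := by
    rw [heq] at hlen
    have := pvSliceLen cs (i + 1 - k) (i + k) ha (by omega) hb
    omega
  have hk3 : (k : ℤ) = 3 := by omega
  have h1' := hall 1 (by omega)
  have h2' := hall 2 (by omega)
  simp only [pvOk, Nat.cast_one, Nat.cast_ofNat] at h1' h2'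
  obtain ⟨ha1, hb1, he1⟩ := h1'
  obtain ⟨ha2, hb2, he2⟩ := h2'
  rw [hk3] at heq hstop
  have ea : i + 1 - 3 = i - 2 := by ring
  rw [ea] at heq
  refine ⟨(pvWin5_iff _ _).mpr ⟨?_, ?_, ?_⟩, by omega, by omega, heq⟩
  · have e3 : i - 2 + 4 = i + 2 := by ring
    rw [e3]
    exact he2
  · have e1 : i - 2 + 1 = i - 1 := by ring
    have e2 : i - 2 + 3 = i + 1 := by ring
    rw [e1, e2]
    exact he1
  · by_cases c1 : i - 2 = 0
    · exact Or.inl c1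
    by_cases c2 : i - 2 + 5 = (cs.length : Int)
    · exact Or.inr (Or.inl c2)
    refine Or.inr (Or.inr ?_)
    intro he
    apply hstop
    refine ⟨by omega, by omega, ?_⟩
    have e1 : i - 2 - 1 = i - 3 := by ring
    have e2 : i - 2 + 5 = i + 3 := by ring
    rw [e1, e2] at he
    exact he

theorem pvWin4_expand (cs : List Char) (p : Int) (h0 : 0 ≤ p) (h1 : p < (cs.length : Int) - 3)
    (hw : pvWin4 cs p = true) :
    pvExpand cs (p + 1) (p + 2) = PySem.List.slice cs (some p) (some (p + 4)) := by
  obtain ⟨hw1, hw2, hw3⟩ := (pvWin4_iff cs p).mp hw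
  have e1 : p + 1 - 1 = p := by ring
  have e2 : p + 2 + 1 = p + 3 := by ring
  have e3 : p - 1 + 1 = p := by ring
  rw [pvExpand, dif_pos ⟨by omega, by omega, hw2⟩, e1, e2]
  rw [pvExpand, dif_pos ⟨h0, by omega, hw1⟩]
  have e5 : p + 3 + 1 = p + 4 := by ring
  rw [e5]
  rw [pvExpand, dif_neg ?_, e3]
  rintro ⟨hc1, hc2, hc3⟩
  rcases hw3 with h | h | h
  · omega
  · omega
  · exact h hc3

theorem pvWin5_expand (cs : List Char) (p : Int) (h0 : 0 ≤ p) (h1 : p < (cs.length : Int) - 4)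
    (hw : pvWin5 cs p = true) :
    pvExpand cs (p + 2) (p + 2) = PySem.List.slice cs (some p) (some (p + 5)) := by
  obtain ⟨hw1, hw2, hw3⟩ := (pvWin5_iff cs p).mp hw
  have e1 : p + 2 - 1 = p + 1 := by ring
  have e2 : p + 2 + 1 = p + 3 := by ring
  rw [pvExpand, dif_pos ⟨by omega, by omega, rfl⟩, e1, e2]
  have e3 : p + 1 - 1 = p := by ring
  have e4 : p + 3 + 1 = p + 4 := by ring
  rw [pvExpand, dif_pos ⟨by omega, by omega, hw2⟩, e3, e4]
  have e5 : p + 4 + 1 = p + 5 := by ring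
  rw [pvExpand, dif_pos ⟨h0, by omega, hw1⟩, e5]
  have e6 : p - 1 + 1 = p := by ring
  rw [pvExpand, dif_neg ?_, e6]
  rintro ⟨hc1, hc2, hc3⟩
  rcases hw3 with h | h | h
  · omega
  · omega
  · exact h hc3

theorem pvMemIteAdd (s : PySem.Set (List Char)) (v t : List Char) :
    t ∈ (if v ≠ [] then PySem.Set.add s v else s) ↔ t ∈ s ∨ (t = v ∧ t ≠ []) := by
  by_cases h : v = []
  · simp [h]
  · rw [if_pos h, PySem.Set.mem_add]
    constructor
    · rintro (ht | ht)
      · exact Or.inl ht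
      · exact Or.inr ⟨ht, ht ▸ h⟩
    · rintro (ht | ⟨ht, -⟩)
      · exact Or.inl ht
      · exact Or.inr ht

theorem pvMemAddIf {β : Type} (P : β → Prop) [DecidablePred P] (g : β → List Char)
    (xs : List β) (s : PySem.Set (List Char)) (t : List Char) :
    t ∈ xs.foldl (fun (f : PySem.Set (List Char)) b => if P b then PySem.Set.add f (g b) else f) s ↔
      t ∈ s ∨ ∃ b ∈ xs, P b ∧ t = g b := by
  induction xs generalizing s with
  | nil => simp
  | cons x xs ih =>
    simp only [List.foldl_cons, ih, List.mem_cons]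
    by_cases h : P x
    · simp [h, PySem.Set.mem_add]
      tauto
    · simp [h]

theorem pvMemA (cs : List Char) (xs : List Int) (s : PySem.Set (List Char)) (t : List Char) :
    t ∈ xs.foldl
        (fun (p : PySem.Set (List Char)) i =>
          let evenPal := pvExpand cs i (i + 1)
          let p := if evenPal ≠ [] then PySem.Set.add p evenPal else p
          let oddPal := pvExpand cs i i
          if oddPal ≠ [] then PySem.Set.add p oddPal else p) s ↔
      t ∈ s ∨ ∃ i ∈ xs, (t = pvExpand cs i (i + 1) ∧ t ≠ []) ∨ (t = pvExpand cs i i ∧ t ≠ []) := by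
  induction xs generalizing s with
  | nil => simp
  | cons x xs ih =>
    simp only [List.foldl_cons, ih, List.exists_mem_cons_iff, pvMemIteAdd]
    constructor
    · rintro (((h | h) | h) | h)
      · exact Or.inl h
      · exact Or.inr (Or.inl (Or.inl h))
      · exact Or.inr (Or.inl (Or.inr h))
      · exact Or.inr (Or.inr h)
    · rintro (h | (h | h) | h)
      · exact Or.inl (Or.inl (Or.inl h))
      · exact Or.inl (Or.inl (Or.inr h))
      · exact Or.inl (Or.inr h)
      · exact Or.inr h

theorem pvKey4 (cs : List Char) (t : List Char) :
    ((∃ i ∈ PySem.List.pyRange 0 (cs.length : Int) 1,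
        (t = pvExpand cs i (i + 1) ∧ t ≠ []) ∨ (t = pvExpand cs i i ∧ t ≠ [])) ∧ t.length = 4) ↔
      ∃ p ∈ PySem.List.pyRange 0 ((cs.length : Int) - 3) 1,
        pvWin4 cs p = true ∧ t = PySem.List.slice cs (some p) (some (p + 4)) := by
  constructor
  · rintro ⟨⟨i, hi, h⟩, hlen⟩
    rw [PySem.List.mem_pyRange_one] at hi
    rcases h with ⟨ht, -⟩ | ⟨ht, -⟩
    · obtain ⟨hw, ha, hb, heq⟩ := pvEven_len4 cs i hi.1 (ht ▸ hlen)
      refine ⟨i - 1, ?_, hw, ?_⟩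
      · rw [PySem.List.mem_pyRange_one]; omega
      · have e : i - 1 + 4 = i + 3 := by ring
        rw [e, ht, heq]
    · exact absurd (ht ▸ hlen) (pvOdd_not_len4 cs i hi.1)
  · rintro ⟨p, hp, hw, ht⟩
    rw [PySem.List.mem_pyRange_one] at hp
    have heq := pvWin4_expand cs p hp.1 hp.2 hw
    have hlenZ := pvSliceLen cs p (p + 4) hp.1 (by omega) (by omega)
    have hlen : t.length = 4 := by rw [ht]; omega
    refine ⟨⟨p + 1, ?_, Or.inl ⟨?_, ?_⟩⟩, hlen⟩
    · rw [PySem.List.mem_pyRange_one]; omega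
    · have e : p + 1 + 1 = p + 2 := by ring
      rw [e, heq]; exact ht
    · intro hnil
      rw [hnil] at hlen
      simp at hlen

theorem pvKey5 (cs : List Char) (t : List Char) :
    ((∃ i ∈ PySem.List.pyRange 0 (cs.length : Int) 1,
        (t = pvExpand cs i (i + 1) ∧ t ≠ []) ∨ (t = pvExpand cs i i ∧ t ≠ [])) ∧ t.length = 5) ↔
      ∃ p ∈ PySem.List.pyRange 0 ((cs.length : Int) - 4) 1,
        pvWin5 cs p = true ∧ t = PySem.List.slice cs (some p) (some (p + 5)) := by
  constructor
  · rintro ⟨⟨i, hi, h⟩, hlen⟩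
    rw [PySem.List.mem_pyRange_one] at hi
    rcases h with ⟨ht, -⟩ | ⟨ht, -⟩
    · exact absurd (ht ▸ hlen) (pvEven_not_len5 cs i hi.1)
    · obtain ⟨hw, ha, hb, heq⟩ := pvOdd_len5 cs i hi.1 (ht ▸ hlen)
      refine ⟨i - 2, ?_, hw, ?_⟩
      · rw [PySem.List.mem_pyRange_one]; omega
      · have e : i - 2 + 5 = i + 3 := by ring
        rw [e, ht, heq]
  · rintro ⟨p, hp, hw, ht⟩
    rw [PySem.List.mem_pyRange_one] at hp
    have heq := pvWin5_expand cs p hp.1 hp.2 hw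
    have hlenZ := pvSliceLen cs p (p + 5) hp.1 (by omega) (by omega)
    have hlen : t.length = 5 := by rw [ht]; omega
    refine ⟨⟨p + 2, ?_, Or.inr ⟨?_, ?_⟩⟩, hlen⟩
    · rw [PySem.List.mem_pyRange_one]; omega
    · rw [heq]; exact ht
    · intro hnil
      rw [hnil] at hlen
      simp at hlen

theorem pvNodupFold {β : Type} (f : PySem.Set (List Char) → β → PySem.Set (List Char))
    (hf : ∀ s b, s.Nodup → (f s b).Nodup) (xs : List β) (s : PySem.Set (List Char))
    (hs : s.Nodup) : (xs.foldl f s).Nodup := by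
  induction xs generalizing s with
  | nil => exact hs
  | cons x xs ih => exact ih _ (hf _ _ hs)

theorem pvScoreFold (l : List (List Char)) (a : Int) :
    l.foldl
        (fun score pal =>
          if (pal.length : Int) = 5 then score + 10
          else if (pal.length : Int) = 4 then score + 5
          else score) a =
      a + 5 * (l.countP (fun t => t.length == 4) : Int) + 10 * (l.countP (fun t => t.length == 5) : Int) := by
  induction l generalizing a with
  | nil => simp
  | cons x xs ih =>
    simp only [List.foldl_cons, ih, List.countP_cons]
    by_cases h5 : x.length = 5 <;> by_cases h4 : x.length = 4 <;>
      (simp [h4, h5]; omega)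


-- ===== VERDICT (by name: the statement is the Claim_ definition above) =====
theorem palindromic_substrings_score_spec : Claim_equal_palindromic_substrings_score := by
  intro s _
  unfold Spec_palindromic_substrings_score
  simp only [palindromic_substrings_score, palindromic_substrings_score_alt]
  rw [pvScoreFold]
  have nodupA : (List.foldl
      (fun (p : PySem.Set (List Char)) i =>
        let evenPal := pvExpand s.toList i (i + 1)
        let p := if evenPal ≠ [] then PySem.Set.add p evenPal else p
        let oddPal := pvExpand s.toList i i
        if oddPal ≠ [] then PySem.Set.add p oddPal else p)
      [] (PySem.List.pyRange 0 (s.toList.length : Int) 1)).Nodup := by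
    refine pvNodupFold _ ?_ _ [] List.nodup_nil
    intro q b hq
    dsimp only
    split_ifs <;>
      first
        | exact PySem.Set.nodup_add _ _ (PySem.Set.nodup_add _ _ hq)
        | exact PySem.Set.nodup_add _ _ hq
        | exact hq
  have nodupB4 : (List.foldl
      (fun (f : PySem.Set (List Char)) i =>
        if pvWin4 s.toList i then PySem.Set.add f (PySem.List.slice s.toList (some i) (some (i + 4))) else f)
      [] (PySem.List.pyRange 0 ((s.toList.length : Int) - 3) 1)).Nodup := by
    refine pvNodupFold _ ?_ _ [] List.nodup_nil
    intro q b hq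
    dsimp only
    split_ifs
    · exact PySem.Set.nodup_add _ _ hq
    · exact hq
  have nodupB5 : (List.foldl
      (fun (f : PySem.Set (List Char)) i =>
        if pvWin5 s.toList i then PySem.Set.add f (PySem.List.slice s.toList (some i) (some (i + 5))) else f)
      [] (PySem.List.pyRange 0 ((s.toList.length : Int) - 4) 1)).Nodup := by
    refine pvNodupFold _ ?_ _ [] List.nodup_nil
    intro q b hq
    dsimp only
    split_ifs
    · exact PySem.Set.nodup_add _ _ hq
    · exact hq
  have h4 : (List.foldl
      (fun (p : PySem.Set (List Char)) i =>
        let evenPal := pvExpand s.toList i (i + 1)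
        let p := if evenPal ≠ [] then PySem.Set.add p evenPal else p
        let oddPal := pvExpand s.toList i i
        if oddPal ≠ [] then PySem.Set.add p oddPal else p)
      [] (PySem.List.pyRange 0 (s.toList.length : Int) 1)).countP (fun t => t.length == 4) =
      (List.foldl
      (fun (f : PySem.Set (List Char)) i =>
        if pvWin4 s.toList i then PySem.Set.add f (PySem.List.slice s.toList (some i) (some (i + 4))) else f)
      [] (PySem.List.pyRange 0 ((s.toList.length : Int) - 3) 1)).length := by
    rw [List.countP_eq_length_filter]
    refine List.Perm.length_eq ((List.perm_ext_iff_of_nodup (List.Nodup.filter _ nodupA) nodupB4).mpr ?_)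
    intro t
    rw [List.mem_filter, pvMemA,
      pvMemAddIf (fun i => pvWin4 s.toList i = true) (fun i => PySem.List.slice s.toList (some i) (some (i + 4)))]
    simp only [List.not_mem_nil, false_or, beq_iff_eq]
    exact pvKey4 s.toList t
  have h5 : (List.foldl
      (fun (p : PySem.Set (List Char)) i =>
        let evenPal := pvExpand s.toList i (i + 1)
        let p := if evenPal ≠ [] then PySem.Set.add p evenPal else p
        let oddPal := pvExpand s.toList i i
        if oddPal ≠ [] then PySem.Set.add p oddPal else p)
      [] (PySem.List.pyRange 0 (s.toList.length : Int) 1)).countP (fun t => t.length == 5) =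
      (List.foldl
      (fun (f : PySem.Set (List Char)) i =>
        if pvWin5 s.toList i then PySem.Set.add f (PySem.List.slice s.toList (some i) (some (i + 5))) else f)
      [] (PySem.List.pyRange 0 ((s.toList.length : Int) - 4) 1)).length := by
    rw [List.countP_eq_length_filter]
    refine List.Perm.length_eq ((List.perm_ext_iff_of_nodup (List.Nodup.filter _ nodupA) nodupB5).mpr ?_)
    intro t
    rw [List.mem_filter, pvMemA,
      pvMemAddIf (fun i => pvWin5 s.toList i = true) (fun i => PySem.List.slice s.toList (some i) (some (i + 5)))]
    simp only [List.not_mem_nil, false_or, beq_iff_eq]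
    exact pvKey5 s.toList t
  rw [h4, h5]
  ring
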